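-- pv_equiv track=rewrite | github.com/PRISM-System/PRISM-Monitor | prism_monitor/modules/dashboard/dashboard.py | _infer_line_col
-- ===== SOURCE A (Python) =====
-- from typing import Dict, Iterator, List, Literal, Optional, Callable, Sequence
--
-- LINE_COL_PRIORITY = (
--     "EQUIPMENT_ID", "PROCESS_ID", "PRODUCTION_LINE",
--     "STATION_ID", "CHAMBER_ID", "PRESS_ID", "SENSOR_ID",
--     "LINE_ID", "CELL_ID", "BOOTH_ID", "CASTER_ID", "CONVERTER_ID",
-- )
--
-- def _infer_line_col(columns: Sequence[str]) -> Optional[str]: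
--     # 우선순위 컬럼 먼저
--     for c in LINE_COL_PRIORITY:
--         if c in columns:
--             return c
--     # 그 외 `_ID` 로 끝나는 첫 컬럼
--     for c in columns:
--         if str(c).upper().endswith("_ID"):
--             return c
--     return None
-- ===== SOURCE B (Python) =====
-- from typing import Optional, Sequence
--
-- LINE_COL_PRIORITY = (
--     "EQUIPMENT_ID", "PROCESS_ID", "PRODUCTION_LINE",
--     "STATION_ID", "CHAMBER_ID", "PRESS_ID", "SENSOR_ID",
--     "LINE_ID", "CELL_ID", "BOOTH_ID", "CASTER_ID", "CONVERTER_ID",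
-- )
--
-- _RANK = {name: i for i, name in enumerate(LINE_COL_PRIORITY)}
--
-- def _infer_line_col(columns: Sequence[str]) -> Optional[str]:
--     best = None       # (rank, column) with the smallest rank seen so far
--     first_id = None   # first column whose upper-cased name ends with "_ID"
--     for c in columns:
--         r = _RANK.get(c)
--         if r is not None and (best is None or r < best[0]):
--             best = (r, c)
--         if first_id is None and str(c).upper().endswith("_ID"):
--             first_id = c
--     if best is not None:
--         return best[1]
--     return first_id
-- ===== Notes on version B (the rewrite author's own statement) =====
-- stated objective: alternative
-- what changed: Replaces the priority-first double scan (12 membership tests over columns, then an _ID scan) by one single pass over columns that keeps the minimum-rank priority match via a precomputed name-to-rank dict and, in the same pass, the first column ending in _ID.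
import Mathlib
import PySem

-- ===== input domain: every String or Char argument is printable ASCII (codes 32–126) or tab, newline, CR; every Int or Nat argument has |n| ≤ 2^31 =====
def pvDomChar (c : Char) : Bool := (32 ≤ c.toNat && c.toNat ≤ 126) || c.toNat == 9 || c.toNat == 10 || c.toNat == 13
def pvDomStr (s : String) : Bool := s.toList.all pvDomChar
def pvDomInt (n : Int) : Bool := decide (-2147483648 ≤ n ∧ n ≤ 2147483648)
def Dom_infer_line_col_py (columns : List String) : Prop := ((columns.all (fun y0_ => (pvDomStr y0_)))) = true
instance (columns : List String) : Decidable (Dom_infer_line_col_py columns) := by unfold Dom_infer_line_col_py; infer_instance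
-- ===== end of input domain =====

-- B replaces A's priority-first double scan with one single pass over the columns
-- (min-rank tracking via a precomputed rank dict, plus the first `_ID` column);
-- return values agree everywhere (pure function, no side effects).

def pvPriority : List String :=
  ["EQUIPMENT_ID", "PROCESS_ID", "PRODUCTION_LINE",
   "STATION_ID", "CHAMBER_ID", "PRESS_ID", "SENSOR_ID",
   "LINE_ID", "CELL_ID", "BOOTH_ID", "CASTER_ID", "CONVERTER_ID"]

-- ===== PORT A =====
-- first loop of A: `for c in LINE_COL_PRIORITY: if c in columns: return c`
def pvFindPriority : List String → List String → Option String
  | [], _ => none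
  | p :: ps, cols => if cols.contains p then some p else pvFindPriority ps cols

-- second loop of A: `for c in columns: if str(c).upper().endswith("_ID"): return c`
def pvFindId : List String → Option String
  | [] => none
  | c :: cs =>
      if PySem.Str.endswith (PySem.Str.upper c) "_ID" then some c else pvFindId cs

def infer_line_col_py (columns : List String) : Option String :=
  match pvFindPriority pvPriority columns with
  | some c => some c
  | none => pvFindId columns

-- ===== PORT B =====
-- `_RANK = {name: i for i, name in enumerate(LINE_COL_PRIORITY)}`
def pvRank : PySem.Dict String Int :=
  PySem.Dict.ofList ((PySem.List.enumerate pvPriority).map (fun p => (p.2, p.1)))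

-- B's single loop over the columns, carrying (best, first_id)
def pvLoopB : List String → Option (Int × String) → Option String →
    Option (Int × String) × Option String
  | [], best, firstId => (best, firstId)
  | c :: cs, best, firstId =>
      let best' :=
        match pvRank.get? c with
        | none => best
        | some r =>
            match best with
            | none => some (r, c)
            | some b => if r < b.1 then some (r, c) else best
      let firstId' :=
        match firstId with
        | some x => some x
        | none =>
            if PySem.Str.endswith (PySem.Str.upper c) "_ID" then some c else none
      pvLoopB cs best' firstId'

def infer_line_col_py_alt (columns : List String) : Option String :=
  match pvLoopB columns none none with
  | (some b, _) => some b.2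
  | (none, firstId) => firstId

-- ===== PRECONDITION & SPEC =====
def Spec_infer_line_col_py (columns : List String) (out : Option String) : Prop := out = infer_line_col_py_alt columns
instance (columns : List String) (out : Option String) : Decidable (Spec_infer_line_col_py columns out) := by unfold Spec_infer_line_col_py; infer_instance

-- ===== CLAIM (what is proved, stated in full; the proofs are below) =====
def Claim_equal_infer_line_col_py : Prop := ∀ (columns : List String), Dom_infer_line_col_py columns → Spec_infer_line_col_py columns (infer_line_col_py columns)

-- ===== LEMMAS AND PROOFS =====

-- B's single loop decomposes into an independent best-run and first-id-run
def pvBestStep (best : Option (Int × String)) (c : String) : Option (Int × String) :=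
  match pvRank.get? c with
  | none => best
  | some r =>
      match best with
      | none => some (r, c)
      | some b => if r < b.1 then some (r, c) else best

def pvBestRun : List String → Option (Int × String) → Option (Int × String)
  | [], best => best
  | c :: cs, best => pvBestRun cs (pvBestStep best c)

lemma pvLoopB_decompose (cs : List String) (best : Option (Int × String)) (fid : Option String) :
    pvLoopB cs best fid =
      (pvBestRun cs best, match fid with | some x => some x | none => pvFindId cs) := by
  induction cs generalizing best fid with
  | nil => cases fid <;> rfl
  | cons c cs ih =>
      simp only [pvLoopB, pvBestRun, pvBestStep, pvFindId]
      cases fid with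
      | some x => rw [ih]
      | none =>
          by_cases h : PySem.Str.endswith (PySem.Str.upper c) "_ID" = true
          · simp only [h, if_pos]; rw [ih]
          · simp only [h]; rw [ih]; simp

lemma pvBestStep_none (b : Option (Int × String)) (c : String)
    (h : pvBestStep b c = none) : b = none ∧ pvRank.get? c = none := by
  unfold pvBestStep at h
  cases hg : pvRank.get? c with
  | none => rw [hg] at h; exact ⟨h, rfl⟩
  | some r =>
      rw [hg] at h
      cases b with
      | none => simp at h
      | some p => dsimp at h; split at h <;> simp at h

lemma pvBestRun_none_acc (cs : List String) :
    ∀ b, pvBestRun cs b = none → b = none ∧ ∀ c ∈ cs, pvRank.get? c = none := by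
  induction cs with
  | nil => intro b h; exact ⟨h, by simp⟩
  | cons c cs ih =>
      intro b h
      obtain ⟨h1, h2⟩ := ih _ h
      obtain ⟨hb, hc⟩ := pvBestStep_none b c h1
      refine ⟨hb, ?_⟩
      intro x hx
      rcases List.mem_cons.mp hx with rfl | hx
      · exact hc
      · exact h2 x hx

lemma pvBestRun_some_acc (cs : List String) :
    ∀ b r v, pvBestRun cs b = some (r, v) →
      (b = some (r, v) ∨ (v ∈ cs ∧ pvRank.get? v = some r)) ∧
      (∀ c ∈ cs, ∀ r', pvRank.get? c = some r' → r ≤ r') ∧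
      (∀ p, b = some p → r ≤ p.1) := by
  induction cs with
  | nil =>
      intro b r v h
      refine ⟨Or.inl h, by simp, fun p hp => ?_⟩
      rw [hp] at h
      have : p = (r, v) := Option.some.inj h
      simp [this]
  | cons c cs ih =>
      intro b r v h
      obtain ⟨h1, h2, h3⟩ := ih _ _ _ h
      have hstep : ∀ p, b = some p → r ≤ p.1 := by
        intro p hp
        unfold pvBestStep at h3
        cases hg : pvRank.get? c with
        | none => exact h3 p (by rw [hg, hp])
        | some rc =>
            rw [hg, hp] at h3
            by_cases hlt : rc < p.1
            · have hx : r ≤ rc := h3 (rc, c) (by simp [hlt])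
              omega
            · exact h3 p (by simp [hlt])
      refine ⟨?_, ?_, hstep⟩
      · rcases h1 with h1 | ⟨hv, hr⟩
        · unfold pvBestStep at h1
          cases hg : pvRank.get? c with
          | none => rw [hg] at h1; exact Or.inl h1
          | some rc =>
              rw [hg] at h1
              cases b with
              | none =>
                  dsimp at h1
                  obtain ⟨hr1, hv1⟩ : rc = r ∧ c = v := by simpa using h1
                  exact Or.inr ⟨by simp [← hv1], by rw [← hv1, hg, hr1]⟩
              | some p =>
                  dsimp at h1
                  split at h1
                  · obtain ⟨hr1, hv1⟩ : rc = r ∧ c = v := by simpa using h1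
                    exact Or.inr ⟨by simp [← hv1], by rw [← hv1, hg, hr1]⟩
                  · exact Or.inl h1
        · exact Or.inr ⟨List.mem_cons_of_mem _ hv, hr⟩
      · intro x hx r' hr'
        rcases List.mem_cons.mp hx with rfl | hx
        · unfold pvBestStep at h3
          rw [hr'] at h3
          cases b with
          | none => exact h3 (r', x) rfl
          | some p =>
              dsimp at h3
              by_cases hlt : r' < p.1
              · exact h3 (r', x) (by simp [hlt])
              · have hx : r ≤ p.1 := h3 p (by simp [hlt]); omega
        · exact h2 x hx r' hr'

lemma pvBestRun_some (cs : List String) (r : Int) (v : String) :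
    pvBestRun cs none = some (r, v) →
      v ∈ cs ∧ pvRank.get? v = some r ∧
        ∀ c ∈ cs, ∀ r', pvRank.get? c = some r' → r ≤ r' := by
  intro h
  obtain ⟨h1, h2, _⟩ := pvBestRun_some_acc cs none r v h
  rcases h1 with h1 | ⟨hv, hr⟩
  · simp at h1
  · exact ⟨hv, hr, h2⟩

lemma pvBestRun_none (cs : List String) :
    pvBestRun cs none = none → ∀ c ∈ cs, pvRank.get? c = none :=
  fun h => (pvBestRun_none_acc cs none h).2

set_option maxHeartbeats 1000000 in
lemma pvRank_eq_mk : pvRank = PySem.Dict.mk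
      [("EQUIPMENT_ID", 0), ("PROCESS_ID", 1), ("PRODUCTION_LINE", 2),
       ("STATION_ID", 3), ("CHAMBER_ID", 4), ("PRESS_ID", 5), ("SENSOR_ID", 6),
       ("LINE_ID", 7), ("CELL_ID", 8), ("BOOTH_ID", 9), ("CASTER_ID", 10),
       ("CONVERTER_ID", 11)] := by decide

set_option maxHeartbeats 1000000 in
lemma rank_cases (c : String) (r : Int) (h : pvRank.get? c = some r) :
    (c = "EQUIPMENT_ID" ∧ r = 0) ∨ (c = "PROCESS_ID" ∧ r = 1) ∨
    (c = "PRODUCTION_LINE" ∧ r = 2) ∨ (c = "STATION_ID" ∧ r = 3) ∨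
    (c = "CHAMBER_ID" ∧ r = 4) ∨ (c = "PRESS_ID" ∧ r = 5) ∨
    (c = "SENSOR_ID" ∧ r = 6) ∨ (c = "LINE_ID" ∧ r = 7) ∨
    (c = "CELL_ID" ∧ r = 8) ∨ (c = "BOOTH_ID" ∧ r = 9) ∨
    (c = "CASTER_ID" ∧ r = 10) ∨ (c = "CONVERTER_ID" ∧ r = 11) := by
  rw [pvRank_eq_mk] at h
  simp only [PySem.Dict.get?_mk_cons, beq_iff_eq] at h
  split_ifs at h with h0 h1 h2 h3 h4 h5 h6 h7 h8 h9 h10 h11 <;>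
    first
      | simp_all
      | simp [PySem.Dict.get?] at h

lemma not_mem_of_min {cols : List String} {r : Int}
    (hmin : ∀ c ∈ cols, ∀ r', pvRank.get? c = some r' → r ≤ r')
    (p : String) (rp : Int) (hp : pvRank.get? p = some rp) (hlt : rp < r) :
    p ∉ cols :=
  fun h => absurd (hmin p h rp hp) (by omega)

-- ===== VERDICT (by name: the statement is the Claim_ definition above) =====
set_option maxHeartbeats 2000000 in
theorem infer_line_col_py_spec : Claim_equal_infer_line_col_py := by
  intro cols _
  unfold Spec_infer_line_col_py infer_line_col_py infer_line_col_py_alt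
  rw [pvLoopB_decompose]
  cases hb : pvBestRun cols none with
  | none =>
      have hnone := pvBestRun_none cols hb
      have key : ∀ (p : String) (rp : Int), pvRank.get? p = some rp → p ∉ cols := by
        intro p rp hrp h
        rw [hnone p h] at hrp; cases hrp
      have hfp : pvFindPriority pvPriority cols = none := by
        simp [pvFindPriority, pvPriority,
          key "EQUIPMENT_ID" 0 (by rw [pvRank_eq_mk]; decide),
          key "PROCESS_ID" 1 (by rw [pvRank_eq_mk]; decide),
          key "PRODUCTION_LINE" 2 (by rw [pvRank_eq_mk]; decide),
          key "STATION_ID" 3 (by rw [pvRank_eq_mk]; decide),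
          key "CHAMBER_ID" 4 (by rw [pvRank_eq_mk]; decide),
          key "PRESS_ID" 5 (by rw [pvRank_eq_mk]; decide),
          key "SENSOR_ID" 6 (by rw [pvRank_eq_mk]; decide),
          key "LINE_ID" 7 (by rw [pvRank_eq_mk]; decide),
          key "CELL_ID" 8 (by rw [pvRank_eq_mk]; decide),
          key "BOOTH_ID" 9 (by rw [pvRank_eq_mk]; decide),
          key "CASTER_ID" 10 (by rw [pvRank_eq_mk]; decide),
          key "CONVERTER_ID" 11 (by rw [pvRank_eq_mk]; decide)]
      rw [hfp]
  | some p =>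
      obtain ⟨rr, v⟩ := p
      obtain ⟨hv, hr, hmin⟩ := pvBestRun_some cols rr v hb
      have hf := fun p rp hp hlt => not_mem_of_min hmin p rp hp hlt
      have hfp : pvFindPriority pvPriority cols = some v := by
        rcases rank_cases v rr hr with ⟨rfl, rfl⟩ | ⟨rfl, rfl⟩ | ⟨rfl, rfl⟩ | ⟨rfl, rfl⟩ | ⟨rfl, rfl⟩ | ⟨rfl, rfl⟩ | ⟨rfl, rfl⟩ | ⟨rfl, rfl⟩ | ⟨rfl, rfl⟩ | ⟨rfl, rfl⟩ | ⟨rfl, rfl⟩ | ⟨rfl, rfl⟩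
        · simp [pvFindPriority, pvPriority, hv]
        · simp [pvFindPriority, pvPriority, hv, hf "EQUIPMENT_ID" 0 (by rw [pvRank_eq_mk]; decide) (by decide)]
        · simp [pvFindPriority, pvPriority, hv, hf "EQUIPMENT_ID" 0 (by rw [pvRank_eq_mk]; decide) (by decide), hf "PROCESS_ID" 1 (by rw [pvRank_eq_mk]; decide) (by decide)]
        · simp [pvFindPriority, pvPriority, hv, hf "EQUIPMENT_ID" 0 (by rw [pvRank_eq_mk]; decide) (by decide), hf "PROCESS_ID" 1 (by rw [pvRank_eq_mk]; decide) (by decide), hf "PRODUCTION_LINE" 2 (by rw [pvRank_eq_mk]; decide) (by decide)]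
        · simp [pvFindPriority, pvPriority, hv, hf "EQUIPMENT_ID" 0 (by rw [pvRank_eq_mk]; decide) (by decide), hf "PROCESS_ID" 1 (by rw [pvRank_eq_mk]; decide) (by decide), hf "PRODUCTION_LINE" 2 (by rw [pvRank_eq_mk]; decide) (by decide), hf "STATION_ID" 3 (by rw [pvRank_eq_mk]; decide) (by decide)]
        · simp [pvFindPriority, pvPriority, hv, hf "EQUIPMENT_ID" 0 (by rw [pvRank_eq_mk]; decide) (by decide), hf "PROCESS_ID" 1 (by rw [pvRank_eq_mk]; decide) (by decide), hf "PRODUCTION_LINE" 2 (by rw [pvRank_eq_mk]; decide) (by decide), hf "STATION_ID" 3 (by rw [pvRank_eq_mk]; decide) (by decide), hf "CHAMBER_ID" 4 (by rw [pvRank_eq_mk]; decide) (by decide)]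
        · simp [pvFindPriority, pvPriority, hv, hf "EQUIPMENT_ID" 0 (by rw [pvRank_eq_mk]; decide) (by decide), hf "PROCESS_ID" 1 (by rw [pvRank_eq_mk]; decide) (by decide), hf "PRODUCTION_LINE" 2 (by rw [pvRank_eq_mk]; decide) (by decide), hf "STATION_ID" 3 (by rw [pvRank_eq_mk]; decide) (by decide), hf "CHAMBER_ID" 4 (by rw [pvRank_eq_mk]; decide) (by decide), hf "PRESS_ID" 5 (by rw [pvRank_eq_mk]; decide) (by decide)]
        · simp [pvFindPriority, pvPriority, hv, hf "EQUIPMENT_ID" 0 (by rw [pvRank_eq_mk]; decide) (by decide), hf "PROCESS_ID" 1 (by rw [pvRank_eq_mk]; decide) (by decide), hf "PRODUCTION_LINE" 2 (by rw [pvRank_eq_mk]; decide) (by decide), hf "STATION_ID" 3 (by rw [pvRank_eq_mk]; decide) (by decide), hf "CHAMBER_ID" 4 (by rw [pvRank_eq_mk]; decide) (by decide), hf "PRESS_ID" 5 (by rw [pvRank_eq_mk]; decide) (by decide), hf "SENSOR_ID" 6 (by rw [pvRank_eq_mk]; decide) (by decide)]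
        · simp [pvFindPriority, pvPriority, hv, hf "EQUIPMENT_ID" 0 (by rw [pvRank_eq_mk]; decide) (by decide), hf "PROCESS_ID" 1 (by rw [pvRank_eq_mk]; decide) (by decide), hf "PRODUCTION_LINE" 2 (by rw [pvRank_eq_mk]; decide) (by decide), hf "STATION_ID" 3 (by rw [pvRank_eq_mk]; decide) (by decide), hf "CHAMBER_ID" 4 (by rw [pvRank_eq_mk]; decide) (by decide), hf "PRESS_ID" 5 (by rw [pvRank_eq_mk]; decide) (by decide), hf "SENSOR_ID" 6 (by rw [pvRank_eq_mk]; decide) (by decide), hf "LINE_ID" 7 (by rw [pvRank_eq_mk]; decide) (by decide)]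
        · simp [pvFindPriority, pvPriority, hv, hf "EQUIPMENT_ID" 0 (by rw [pvRank_eq_mk]; decide) (by decide), hf "PROCESS_ID" 1 (by rw [pvRank_eq_mk]; decide) (by decide), hf "PRODUCTION_LINE" 2 (by rw [pvRank_eq_mk]; decide) (by decide), hf "STATION_ID" 3 (by rw [pvRank_eq_mk]; decide) (by decide), hf "CHAMBER_ID" 4 (by rw [pvRank_eq_mk]; decide) (by decide), hf "PRESS_ID" 5 (by rw [pvRank_eq_mk]; decide) (by decide), hf "SENSOR_ID" 6 (by rw [pvRank_eq_mk]; decide) (by decide), hf "LINE_ID" 7 (by rw [pvRank_eq_mk]; decide) (by decide), hf "CELL_ID" 8 (by rw [pvRank_eq_mk]; decide) (by decide)]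
        · simp [pvFindPriority, pvPriority, hv, hf "EQUIPMENT_ID" 0 (by rw [pvRank_eq_mk]; decide) (by decide), hf "PROCESS_ID" 1 (by rw [pvRank_eq_mk]; decide) (by decide), hf "PRODUCTION_LINE" 2 (by rw [pvRank_eq_mk]; decide) (by decide), hf "STATION_ID" 3 (by rw [pvRank_eq_mk]; decide) (by decide), hf "CHAMBER_ID" 4 (by rw [pvRank_eq_mk]; decide) (by decide), hf "PRESS_ID" 5 (by rw [pvRank_eq_mk]; decide) (by decide), hf "SENSOR_ID" 6 (by rw [pvRank_eq_mk]; decide) (by decide), hf "LINE_ID" 7 (by rw [pvRank_eq_mk]; decide) (by decide), hf "CELL_ID" 8 (by rw [pvRank_eq_mk]; decide) (by decide), hf "BOOTH_ID" 9 (by rw [pvRank_eq_mk]; decide) (by decide)]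
        · simp [pvFindPriority, pvPriority, hv, hf "EQUIPMENT_ID" 0 (by rw [pvRank_eq_mk]; decide) (by decide), hf "PROCESS_ID" 1 (by rw [pvRank_eq_mk]; decide) (by decide), hf "PRODUCTION_LINE" 2 (by rw [pvRank_eq_mk]; decide) (by decide), hf "STATION_ID" 3 (by rw [pvRank_eq_mk]; decide) (by decide), hf "CHAMBER_ID" 4 (by rw [pvRank_eq_mk]; decide) (by decide), hf "PRESS_ID" 5 (by rw [pvRank_eq_mk]; decide) (by decide), hf "SENSOR_ID" 6 (by rw [pvRank_eq_mk]; decide) (by decide), hf "LINE_ID" 7 (by rw [pvRank_eq_mk]; decide) (by decide), hf "CELL_ID" 8 (by rw [pvRank_eq_mk]; decide) (by decide), hf "BOOTH_ID" 9 (by rw [pvRank_eq_mk]; decide) (by decide), hf "CASTER_ID" 10 (by rw [pvRank_eq_mk]; decide) (by decide)]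
      rw [hfp]
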